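-- pv_equiv track=rewrite | github.com/wsheng/fantasy-bot | waiver_scanner.py | _bench_category
-- ===== SOURCE A (Python) =====
-- from typing import Optional
--
-- def _bench_category(positions: list[str]) -> Optional[str]:
--     """Classify a player into bench target category: G, F, or C."""
--     if "C" in positions:
--         return "C"
--     if any(p in positions for p in ("SF", "PF", "F")):
--         return "F"
--     if any(p in positions for p in ("PG", "SG", "G")):
--         return "G"
--     return None
-- ===== SOURCE B (Python) =====
-- from typing import Optional
--
-- _CAT = {"C": "C", "SF": "F", "PF": "F", "F": "F", "PG": "G", "SG": "G", "G": "G"}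
--
-- def _bench_category(positions: list[str]) -> Optional[str]:
--     """One classify pass builds the set of categories present, then a single priority scan."""
--     present = set()
--     for p in positions:
--         c = _CAT.get(p)
--         if c is not None:
--             present.add(c)
--     for cat in ("C", "F", "G"):
--         if cat in present:
--             return cat
--     return None
-- ===== Notes on version B (the rewrite author's own statement) =====
-- stated objective: alternative
-- what changed: B replaces A's per-category membership scans of positions with a single classify pass building the set of categories present via a static position->category dict, followed by one scan over the fixed priority tuple (C,F,G).
import Mathlib
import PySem

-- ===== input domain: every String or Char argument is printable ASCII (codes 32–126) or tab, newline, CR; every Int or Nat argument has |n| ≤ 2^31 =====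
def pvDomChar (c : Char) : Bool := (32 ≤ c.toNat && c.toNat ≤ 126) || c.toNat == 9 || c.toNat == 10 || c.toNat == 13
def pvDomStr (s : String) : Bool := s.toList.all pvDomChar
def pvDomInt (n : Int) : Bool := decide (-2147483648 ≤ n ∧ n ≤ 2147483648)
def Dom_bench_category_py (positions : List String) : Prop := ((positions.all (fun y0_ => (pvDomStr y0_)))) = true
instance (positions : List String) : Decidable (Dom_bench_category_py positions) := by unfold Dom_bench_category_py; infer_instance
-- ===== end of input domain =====

-- B replaces A's per-category membership scans with one classify pass into a set of
-- categories plus a single priority scan; same return value, proved equal on Dom.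


-- ===== PORT A =====
def bench_category_py (positions : List String) : Option String :=
  if positions.contains "C" then some "C"
  else if (["SF", "PF", "F"].any fun p => positions.contains p) then some "F"
  else if (["PG", "SG", "G"].any fun p => positions.contains p) then some "G"
  else none

-- ===== PORT B =====
def pvCatDict : PySem.Dict String String :=
  PySem.Dict.ofList [("C", "C"), ("SF", "F"), ("PF", "F"), ("F", "F"),
                     ("PG", "G"), ("SG", "G"), ("G", "G")]

-- the classify loop: for p in positions: c = _CAT.get(p); if c is not None: present.add(c)
def pvPresent (positions : List String) : PySem.Set String :=
  positions.foldl (fun s p =>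
    match pvCatDict.get? p with
    | some c => PySem.Set.add s c
    | none => s) PySem.Set.empty

-- the priority scan: for cat in ("C","F","G"): if cat in present: return cat
def pvPriority (present : PySem.Set String) : List String → Option String
  | [] => none
  | cat :: rest => if PySem.Set.contains present cat then some cat else pvPriority present rest

def bench_category_py_alt (positions : List String) : Option String :=
  pvPriority (pvPresent positions) ["C", "F", "G"]

-- ===== PRECONDITION & SPEC =====
def Spec_bench_category_py (positions : List String) (out : Option String) : Prop := out = bench_category_py_alt positions
instance (positions : List String) (out : Option String) : Decidable (Spec_bench_category_py positions out) := by unfold Spec_bench_category_py; infer_instance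

-- ===== CLAIM (what is proved, stated in full; the proofs are below) =====
def Claim_equal_bench_category_py : Prop := ∀ (positions : List String), Dom_bench_category_py positions → Spec_bench_category_py positions (bench_category_py positions)

-- ===== LEMMAS AND PROOFS =====

theorem pvCatDict_eq : pvCatDict = PySem.Dict.mk [("C", "C"), ("SF", "F"), ("PF", "F"),
    ("F", "F"), ("PG", "G"), ("SG", "G"), ("G", "G")] := by decide

theorem pvCat_C (p : String) : pvCatDict.get? p = some "C" ↔ p = "C" := by
  rw [pvCatDict_eq]
  simp only [PySem.Dict.get?_mk_cons, beq_iff_eq]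
  split_ifs <;> simp_all [PySem.Dict.get?, eq_comm]

theorem pvCat_F (p : String) : pvCatDict.get? p = some "F" ↔ p = "SF" ∨ p = "PF" ∨ p = "F" := by
  rw [pvCatDict_eq]
  simp only [PySem.Dict.get?_mk_cons, beq_iff_eq]
  split_ifs <;> simp_all [PySem.Dict.get?, eq_comm]

theorem pvCat_G (p : String) : pvCatDict.get? p = some "G" ↔ p = "PG" ∨ p = "SG" ∨ p = "G" := by
  rw [pvCatDict_eq]
  simp only [PySem.Dict.get?_mk_cons, beq_iff_eq]
  split_ifs <;> simp_all [PySem.Dict.get?, eq_comm]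

theorem mem_pvPresent_aux (c : String) (positions : List String) (s : PySem.Set String) :
    c ∈ positions.foldl (fun s p =>
        match pvCatDict.get? p with
        | some c => PySem.Set.add s c
        | none => s) s
    ↔ c ∈ s ∨ ∃ p ∈ positions, pvCatDict.get? p = some c := by
  induction positions generalizing s with
  | nil => simp
  | cons p rest ih =>
    simp only [List.foldl_cons]
    cases h : pvCatDict.get? p with
    | none => simp [h, ih]
    | some c' =>
      simp only [ih, PySem.Set.mem_add, List.mem_cons, or_and_right, exists_or, or_assoc]
      simp [h, eq_comm]

theorem mem_pvPresent (c : String) (positions : List String) :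
    c ∈ pvPresent positions ↔ ∃ p ∈ positions, pvCatDict.get? p = some c := by
  simpa [PySem.Set.empty] using mem_pvPresent_aux c positions PySem.Set.empty

-- ===== VERDICT (by name: the statement is the Claim_ definition above) =====
theorem bench_category_py_spec : Claim_equal_bench_category_py := by
  intro positions _
  unfold Spec_bench_category_py bench_category_py bench_category_py_alt
  simp only [pvPriority, PySem.Set.contains_eq_listContains, List.contains_eq_mem,
    decide_eq_true_eq, mem_pvPresent, pvCat_C, pvCat_F, pvCat_G,
    List.any_eq_true, List.mem_cons, List.not_mem_nil, and_or_left, exists_or, exists_eq_right]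
  split_ifs <;> simp_all
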